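-- pv_equiv track=rewrite | github.com/YiseBoge/CompetitiveProgramming | CodeForce/Contest/A2SV Custom Contests/A2SV2/B.py | k_dominant
-- ===== SOURCE A (Python) =====
-- def k_dominant(string):
--     result, letters = len(string), set(string)
--     for letter in letters:
--         last, res = -1, -1
--         for i, c in enumerate(string):
--             if c == letter:
--                 res = max(res, i - last)
--                 last = i
--         res = max(res, len(string) - last)
--         if -1 < res < result:
--             result = res
--     return result
-- ===== SOURCE B (Python) =====
-- def k_dominant(string):
--     n = len(string)
--     last = {}
--     mx = {}
--     for i, c in enumerate(string):
--         gap = i - last.get(c, -1)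
--         mx[c] = max(mx.get(c, -1), gap)
--         last[c] = i
--     result = n
--     for c, g in mx.items():
--         val = max(g, n - last[c])
--         if val < result:
--             result = val
--     return result
-- ===== Notes on version B (the rewrite author's own statement) =====
-- stated objective: faster
-- what changed: Replaces the per-letter rescan of the whole string (one full pass for every distinct letter) with a single pass maintaining last-index and max-gap dictionaries per letter, then one pass over the dictionary.
import Mathlib
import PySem

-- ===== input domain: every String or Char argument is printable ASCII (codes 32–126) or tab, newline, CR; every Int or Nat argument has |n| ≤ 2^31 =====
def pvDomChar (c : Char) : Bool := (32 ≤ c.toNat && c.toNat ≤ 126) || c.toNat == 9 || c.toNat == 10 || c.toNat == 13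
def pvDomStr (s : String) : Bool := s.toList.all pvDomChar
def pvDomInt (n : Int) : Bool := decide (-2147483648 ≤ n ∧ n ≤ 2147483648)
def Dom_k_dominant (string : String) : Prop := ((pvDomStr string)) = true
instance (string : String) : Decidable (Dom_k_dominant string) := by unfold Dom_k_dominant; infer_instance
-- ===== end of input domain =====

-- B replaces A's per-letter rescan of the whole string (O(n·alphabet)) by a single pass keeping
-- last-index and max-gap dictionaries per letter, then one pass over the dictionary (O(n)); objective: faster.

-- ===== PORT A =====
-- A-side helper: A's inner 'for i, c in enumerate(string)' loop for one letter, state (last, res)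
def innerA (s : List Char) (letter : Char) : Int × Int :=
  (PySem.List.enumerate s).foldl
    (fun (st : Int × Int) p =>
      if p.2 == letter then (p.1, max st.2 (p.1 - st.1)) else st)
    (-1, -1)

def k_dominant (string : String) : Int :=
  let s := string.toList
  (PySem.Set.ofList s).foldl
    (fun result letter =>
      let st := innerA s letter
      let res := max st.2 ((s.length : Int) - st.1)
      if (-1 : Int) < res ∧ res < result then res else result)
    (s.length : Int)

-- ===== PORT B =====
-- B-side helper: one step of B's single pass, state = (last-index dict, max-gap dict)
def bStep (st : PySem.Dict Char Int × PySem.Dict Char Int) (p : Int × Char) :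
    PySem.Dict Char Int × PySem.Dict Char Int :=
  let gap := p.1 - st.1.getD p.2 (-1)
  (st.1.insert p.2 p.1, st.2.insert p.2 (max (st.2.getD p.2 (-1)) gap))

def k_dominant_alt (string : String) : Int :=
  let s := string.toList
  let n : Int := (s.length : Int)
  let st := (PySem.List.enumerate s).foldl bStep (PySem.Dict.empty, PySem.Dict.empty)
  st.2.items.foldl
    (fun result pr =>
      let val := max pr.2 (n - st.1.getD pr.1 (-1))
      if val < result then val else result)
    n

-- ===== PRECONDITION & SPEC =====
def Spec_k_dominant (string : String) (out : Int) : Prop := out = k_dominant_alt string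
instance (string : String) (out : Int) : Decidable (Spec_k_dominant string out) := by unfold Spec_k_dominant; infer_instance

-- ===== CLAIM (what is proved, stated in full; the proofs are below) =====
def Claim_equal_k_dominant : Prop := ∀ (string : String), Dom_k_dominant string → Spec_k_dominant string (k_dominant string)

-- ===== LEMMAS AND PROOFS =====

-- B's dict-building pass on a list of characters
def bState (s : List Char) : PySem.Dict Char Int × PySem.Dict Char Int :=
  (PySem.List.enumerate s).foldl bStep (PySem.Dict.empty, PySem.Dict.empty)

theorem innerA_append (s : List Char) (x letter : Char) :
    innerA (s ++ [x]) letter =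
      (if x == letter
        then ((s.length : Int), max (innerA s letter).2 ((s.length : Int) - (innerA s letter).1))
        else innerA s letter) := by
  unfold innerA
  rw [PySem.List.enumerate_append, List.foldl_append]
  simp [PySem.List.enumerate_cons, PySem.List.enumerate_nil]

theorem innerA_last_bound (s : List Char) (letter : Char) :
    (innerA s letter).1 = -1 ∨ (innerA s letter).1 < (s.length : Int) := by
  induction s using List.reverseRecOn with
  | nil => left; rfl
  | append_singleton s x ih =>
      rw [innerA_append]
      by_cases hx : (x == letter) = true
      · rw [if_pos hx]
        right
        simp only [List.length_append, List.length_singleton]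
        push_cast
        omega
      · rw [if_neg hx]
        rcases ih with h | h
        · left; exact h
        · right
          simp only [List.length_append, List.length_singleton]
          push_cast
          omega

theorem res_pos (s : List Char) (letter : Char) :
    (-1 : Int) < max (innerA s letter).2 ((s.length : Int) - (innerA s letter).1) := by
  have h := innerA_last_bound s letter
  have h2 : (-1 : Int) < (s.length : Int) - (innerA s letter).1 := by
    rcases h with h | h
    · rw [h]; omega
    · omega
  exact lt_of_lt_of_le h2 (le_max_right _ _)

theorem bState_append (s : List Char) (x : Char) :
    bState (s ++ [x]) =
      ((bState s).1.insert x (s.length : Int),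
       (bState s).2.insert x
         (max ((bState s).2.getD x (-1)) ((s.length : Int) - (bState s).1.getD x (-1)))) := by
  unfold bState
  rw [PySem.List.enumerate_append, List.foldl_append]
  simp [PySem.List.enumerate_cons, PySem.List.enumerate_nil, bStep]

theorem bState_inv (s : List Char) :
    (∀ c, (bState s).1.getD c (-1) = (innerA s c).1) ∧
    (∀ c, (bState s).2.getD c (-1) = (innerA s c).2) ∧
    (bState s).2.items = (PySem.Set.ofList s).map (fun c => (c, (innerA s c).2)) := by
  induction s using List.reverseRecOn with
  | nil =>
      exact ⟨fun c => rfl, fun c => rfl, rfl⟩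
  | append_singleton s x ih =>
      obtain ⟨h1, h2, h3⟩ := ih
      have hkeys : (bState s).2.keys = PySem.Set.ofList s := by
        show (bState s).2.items.map (·.1) = _
        rw [h3, List.map_map]
        simp [Function.comp_def]
      refine ⟨fun c => ?_, fun c => ?_, ?_⟩
      · rw [bState_append, PySem.Dict.getD_insert, innerA_append]
        by_cases hc : c = x
        · subst hc; simp
        · have hxc : ¬ x = c := fun h => hc h.symm
          simp [hc, hxc, h1]
      · rw [bState_append, PySem.Dict.getD_insert, innerA_append]
        by_cases hc : c = x
        · subst hc; simp [h1, h2]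
        · have hxc : ¬ x = c := fun h => hc h.symm
          simp [hc, hxc, h2]
      · rw [bState_append]
        have hofl : PySem.Set.ofList (s ++ [x]) = PySem.Set.add (PySem.Set.ofList s) x := by
          rw [PySem.Set.ofList_eq_foldl, List.foldl_append, ← PySem.Set.ofList_eq_foldl]
          rfl
        by_cases hx : x ∈ s
        · have hcont : (bState s).2.contains x = true := by
            rw [PySem.Dict.contains_eq_decide_mem_keys, hkeys]
            simp [PySem.Set.mem_ofList, hx]
          rw [PySem.Dict.items_insert_of_contains _ _ hcont, h3, List.map_map, hofl]
          have hadd : PySem.Set.add (PySem.Set.ofList s) x = PySem.Set.ofList s := by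
            simp [PySem.Set.add, PySem.Set.contains, PySem.Set.mem_ofList, hx]
          rw [hadd]
          apply List.map_congr_left
          intro c _
          by_cases hc : c = x
          · subst hc
            simp [innerA_append, h1, h2]
          · have : (c == x) = false := by simp [hc]
            simp [Function.comp, this, innerA_append, Ne.symm hc]
        · have hcont : (bState s).2.contains x = false := by
            rw [PySem.Dict.contains_eq_decide_mem_keys, hkeys]
            simp [PySem.Set.mem_ofList, hx]
          rw [PySem.Dict.items_insert_of_not_contains _ _ hcont, h3, hofl]
          have hadd : PySem.Set.add (PySem.Set.ofList s) x = PySem.Set.ofList s ++ [x] := by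
            simp [PySem.Set.add, PySem.Set.contains, PySem.Set.mem_ofList, hx]
          rw [hadd, List.map_append]
          congr 1
          · apply List.map_congr_left
            intro c hc
            have hcs : c ∈ s := (PySem.Set.mem_ofList s c).mp hc
            have hne : c ≠ x := fun h => hx (h ▸ hcs)
            simp [innerA_append, Ne.symm hne]
          · simp [innerA_append, h1, h2]

-- ===== VERDICT (by name: the statement is the Claim_ definition above) =====
theorem k_dominant_spec : Claim_equal_k_dominant := by
  intro string _
  unfold Spec_k_dominant k_dominant k_dominant_alt
  set s := string.toList with hs
  obtain ⟨h1, h2, h3⟩ := bState_inv s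
  have hfold : List.foldl bStep (PySem.Dict.empty, PySem.Dict.empty) (PySem.List.enumerate s)
      = bState s := rfl
  show (PySem.Set.ofList s).foldl _ _ = (bState s).2.items.foldl _ _
  rw [h3, List.foldl_map]
  apply PySem.List.foldl_congr_mem
  intro acc c _
  simp only [hfold, h1]
  have hres := res_pos s c
  simp only [hres, true_and]
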